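-- pv_equiv track=rewrite | github.com/bytepool/gscholar | querylib/qc.py | construct_queries
-- ===== SOURCE A (Python) =====
-- def construct_queries(terms, operator):
--     """
--     Combines terms in a given list of lists. You could also think of it as set multiplication.
--
--     terms
--         A list of lists. Each of the inner lists is a bag of terms that should be combined with the other bags.
--
--     operator
--         The operator with which the terms should be linked. E.g., " " or " AND ".
--
--     Example
--         >>> construct_queries([['A', 'B'],['C','D'],['E','F']], " ")
--         ['A C E', 'A C F', 'A D E', 'A D F', 'B C E', 'B C F', 'B D E', 'B D F']
--
--     Returns a list of queries.
--     """
--     queries = []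
--
--     nr_of_bags = len(terms)
--     if nr_of_bags < 1:
--         raise RuntimeError("Too few terms given!")
--     elif nr_of_bags == 1:
--         return terms[0]
--
--     start = terms[0]
--     second_index = 1
--
--     while second_index < nr_of_bags:
--         result = []
--         add = terms[second_index]
--
--         for start_term in start:
--             for add_term in add:
--                 result.append(start_term + operator + add_term)
--
--         start = result
--         second_index = second_index + 1
--
--     return result
-- ===== SOURCE B (Python) =====
-- import itertools
--
-- def construct_queries(terms, operator):
--     if len(terms) < 1:
--         raise RuntimeError("Too few terms given!")
--     if len(terms) == 1:
--         return terms[0]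
--     return [operator.join(combo) for combo in itertools.product(*terms)]
-- ===== Notes on version B (the rewrite author's own statement) =====
-- stated objective: idiomatic
-- what changed: Replaces the accumulating while-loop that rebuilds growing prefix lists bag by bag with a single itertools.product pass and one operator.join per combination.
import Mathlib
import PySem

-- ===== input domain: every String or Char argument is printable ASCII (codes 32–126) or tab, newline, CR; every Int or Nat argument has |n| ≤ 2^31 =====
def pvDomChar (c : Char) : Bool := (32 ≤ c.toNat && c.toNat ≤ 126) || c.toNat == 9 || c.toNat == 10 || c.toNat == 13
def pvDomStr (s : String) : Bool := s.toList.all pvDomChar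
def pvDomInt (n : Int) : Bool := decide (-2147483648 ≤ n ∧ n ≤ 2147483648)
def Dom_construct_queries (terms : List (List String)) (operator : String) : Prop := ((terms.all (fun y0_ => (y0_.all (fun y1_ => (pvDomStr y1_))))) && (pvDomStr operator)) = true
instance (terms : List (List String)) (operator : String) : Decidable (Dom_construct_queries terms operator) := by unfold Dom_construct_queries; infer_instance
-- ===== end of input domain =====

-- B replaces A's accumulating while-loop (rebuilding growing prefix lists bag by bag)
-- with one generation of all combinations (itertools.product) and one join per output (idiomatic).

-- ===== PORT A =====
-- literal transliteration of A: while-loop over the remaining bags, nested append loops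
def construct_queries (terms : List (List String)) (operator : String) : List String :=
  if terms.length < 1 then []   -- Python raises RuntimeError here; excluded by Pre_
  else if terms.length = 1 then terms.headD []
  else
    (terms.tail).foldl
      (fun start add =>
        start.foldl
          (fun result start_term =>
            add.foldl (fun result add_term => result ++ [start_term ++ operator ++ add_term]) result)
          [])
      (terms.headD [])

-- ===== PORT B =====
-- itertools.product(*terms): first factor varies slowest, exactly CPython's order
def pyProduct : List (List String) → List (List String)
  | [] => [[]]
  | xs :: rest => xs.flatMap (fun x => (pyProduct rest).map (fun c => x :: c))

def construct_queries_alt (terms : List (List String)) (operator : String) : List String :=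
  if terms.length < 1 then []   -- Python raises RuntimeError here; excluded by Pre_
  else if terms.length = 1 then terms.headD []
  else (pyProduct terms).map (fun combo => PySem.Str.join operator combo)

-- ===== PRECONDITION & SPEC =====
-- A (and B) raise RuntimeError on an empty list of bags; Pre_ excludes exactly that.
def Pre_construct_queries (terms : List (List String)) (_operator : String) : Prop := terms ≠ []
instance (terms : List (List String)) (operator : String) : Decidable (Pre_construct_queries terms operator) := by unfold Pre_construct_queries; infer_instance
def pvWitness_construct_queries : List (List String) × String := ([["a", "b"], ["c"]], " ")

def Spec_construct_queries (terms : List (List String)) (operator : String) (out : List String) : Prop := out = construct_queries_alt terms operator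
instance (terms : List (List String)) (operator : String) (out : List String) : Decidable (Spec_construct_queries terms operator out) := by unfold Spec_construct_queries; infer_instance

-- ===== CLAIM (what is proved, stated in full; the proofs are below) =====
def Claim_equal_construct_queries : Prop := ∀ (terms : List (List String)) (operator : String), Dom_construct_queries terms operator → Pre_construct_queries terms operator → Spec_construct_queries terms operator (construct_queries terms operator)

-- ===== LEMMAS AND PROOFS =====

-- the string built by folding the joining step over a combination, starting from s
def gjoin (op : String) (s : String) (c : List String) : String :=
  c.foldl (fun u t => u ++ op ++ t) s

theorem join_step (op x y : String) (c : List String) :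
    PySem.Str.join op (x :: y :: c) = PySem.Str.join op ((x ++ op ++ y) :: c) := by
  apply String.toList_inj.mp
  cases c with
  | nil =>
    simp [PySem.Str.toList_join, PySem.Chars.join_cons_cons, PySem.Chars.join_singleton]
  | cons z c =>
    simp [PySem.Str.toList_join, PySem.Chars.join_cons_cons]

theorem join_eq_gjoin (op : String) (c : List String) (x : String) :
    PySem.Str.join op (x :: c) = gjoin op x c := by
  induction c generalizing x with
  | nil =>
    apply String.toList_inj.mp
    simp [PySem.Str.toList_join, PySem.Chars.join_singleton, gjoin]
  | cons y c ih =>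
    rw [join_step, ih]
    rfl

theorem inner_fold_eq (op : String) (s : String) (add : List String) (r0 : List String) :
    add.foldl (fun r t => r ++ [s ++ op ++ t]) r0 = r0 ++ add.map (fun t => s ++ op ++ t) := by
  induction add generalizing r0 with
  | nil => simp
  | cons t add ih => simp [ih]

theorem step_eq (op : String) (start add : List String) (acc : List String) :
    start.foldl
      (fun result s => add.foldl (fun r t => r ++ [s ++ op ++ t]) result) acc
    = acc ++ start.flatMap (fun s => add.map (fun t => s ++ op ++ t)) := by
  induction start generalizing acc with
  | nil => simp
  | cons s start ih =>
    rw [List.foldl_cons, ih, inner_fold_eq, List.flatMap_cons, List.append_assoc]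

theorem loop_eq (op : String) (rest : List (List String)) (start : List String) :
    rest.foldl
      (fun start add =>
        start.foldl
          (fun result s => add.foldl (fun r t => r ++ [s ++ op ++ t]) result) [])
      start
    = start.flatMap (fun s => (pyProduct rest).map (fun c => gjoin op s c)) := by
  induction rest generalizing start with
  | nil => simp [pyProduct, gjoin]
  | cons add rs ih =>
    rw [List.foldl_cons, ih, step_eq, List.nil_append, List.flatMap_assoc]
    congr 1
    funext s
    simp only [pyProduct, List.map_flatMap, List.flatMap_map, List.map_map, Function.comp_def]
    rfl

theorem construct_queries_spec : Claim_equal_construct_queries := by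
  intro terms operator _hdom hpre
  unfold Spec_construct_queries construct_queries construct_queries_alt
  match terms with
  | [] => exact absurd rfl hpre
  | [t0] => rfl
  | t0 :: t1 :: rs =>
    have h1 : ¬ ((t0 :: t1 :: rs).length < 1) := by simp
    have h2 : ¬ ((t0 :: t1 :: rs).length = 1) := by simp
    rw [if_neg h1, if_neg h2, if_neg h1, if_neg h2, List.tail_cons, List.headD_cons]
    rw [loop_eq]
    conv_rhs => rw [pyProduct]
    rw [List.map_flatMap]
    congr 1
    funext s
    rw [List.map_map]
    congr 1
    funext c
    exact (join_eq_gjoin operator c s).symm
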